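-- pv_equiv track=rewrite | github.com/LennyDuan/AlgorithmPython | Hackerrank Basic 2/answer_TLE.py | possibleChanges
-- ===== SOURCE A (Python) =====
-- def possibleChanges(usernames):
--     res = []
--     for name in usernames:
--         find = False
--
--         for j in range(len(name)):
--             for i in range(j,len(name)):
--                 if name[j] > name[i]:
--                     res.append('YES')
--                     find = True
--                     break
--             if find:
--                 break
--         if not find:
--             res.append('NO')
--     return res
-- ===== SOURCE B (Python) =====
-- def possibleChanges(usernames):
--     return ['NO' if all(a <= b for a, b in zip(name, name[1:])) else 'YES'
--             for name in usernames]
-- ===== Notes on version B (the rewrite author's own statement) =====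
-- stated objective: simpler
-- what changed: Replaces A's nested index loops (compare name[j] with every later name[i], with break flags) by a single pass over adjacent character pairs: a string has some inverted pair iff it has an adjacent descent.
import Mathlib
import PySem

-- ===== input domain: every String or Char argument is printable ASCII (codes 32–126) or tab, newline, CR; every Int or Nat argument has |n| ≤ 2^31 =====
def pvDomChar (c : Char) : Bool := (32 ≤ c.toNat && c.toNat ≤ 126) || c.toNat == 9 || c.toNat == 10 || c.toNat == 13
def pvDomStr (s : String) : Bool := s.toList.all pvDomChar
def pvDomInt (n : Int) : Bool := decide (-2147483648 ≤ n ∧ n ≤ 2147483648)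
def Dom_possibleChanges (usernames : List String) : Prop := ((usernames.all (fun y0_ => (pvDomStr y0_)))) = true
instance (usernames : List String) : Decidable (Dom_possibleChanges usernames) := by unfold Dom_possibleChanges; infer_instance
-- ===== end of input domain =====

-- B replaces A's nested per-string index scan (with break flags) by a single pass over adjacent character pairs (simpler).

-- ===== PORT A =====
-- inner loop: for i in range(j, len(name)): if name[j] > name[i]: break — here cj = name[j],
-- and the list argument is the suffix name[j:], so first comparison is cj > cj
def pvAInner (cj : Char) : List Char → Bool
  | [] => false
  | c :: rest => if cj > c then true else pvAInner cj rest

-- outer loop: for j in range(len(name)) — walks the tails of the string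
def pvAOuter : List Char → Bool
  | [] => false
  | c :: rest => if pvAInner c (c :: rest) then true else pvAOuter rest

def possibleChanges (usernames : List String) : List String :=
  usernames.foldl (fun res name =>
    res ++ [if pvAOuter name.toList then "YES" else "NO"]) []

-- ===== PORT B =====
-- all(a <= b for a, b in zip(name, name[1:])) : single pass over adjacent pairs
def pvBChain : List Char → Bool
  | a :: b :: rest => a ≤ b && pvBChain (b :: rest)
  | _ => true

def possibleChanges_alt (usernames : List String) : List String :=
  usernames.map (fun name => if pvBChain name.toList then "NO" else "YES")

-- ===== PRECONDITION & SPEC =====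
def Spec_possibleChanges (usernames : List String) (out : List String) : Prop := out = possibleChanges_alt usernames
instance (usernames : List String) (out : List String) : Decidable (Spec_possibleChanges usernames out) := by unfold Spec_possibleChanges; infer_instance

-- ===== CLAIM (what is proved, stated in full; the proofs are below) =====
def Claim_equal_possibleChanges : Prop := ∀ (usernames : List String), Dom_possibleChanges usernames → Spec_possibleChanges usernames (possibleChanges usernames)

-- ===== LEMMAS AND PROOFS =====

theorem pvAInner_eq_true {cj : Char} {l : List Char} :
    pvAInner cj l = true ↔ ∃ x ∈ l, x < cj := by
  induction l with
  | nil => simp [pvAInner]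
  | cons c rest ih =>
    simp only [pvAInner]
    by_cases h : cj > c
    · simp only [if_pos h, List.mem_cons]
      constructor
      · intro _; exact ⟨c, Or.inl rfl, h⟩
      · intro _; trivial
    · simp only [if_neg h, ih, List.mem_cons]
      constructor
      · rintro ⟨x, hx, hxc⟩; exact ⟨x, Or.inr hx, hxc⟩
      · rintro ⟨x, hmem, hxc⟩
        rcases hmem with rfl | hx
        · exact absurd hxc h
        · exact ⟨x, hx, hxc⟩

theorem pvBChain_le {b : Char} {t : List Char} (h : pvBChain (b :: t) = true) :
    ∀ x ∈ t, b ≤ x := by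
  induction t generalizing b with
  | nil => simp
  | cons c rest ih =>
    simp only [pvBChain, Bool.and_eq_true, decide_eq_true_eq] at h
    intro x hx
    rcases List.mem_cons.mp hx with rfl | hx
    · exact h.1
    · exact le_trans h.1 (ih h.2 x hx)

theorem pvAOuter_eq_not_bChain (s : List Char) : pvAOuter s = !pvBChain s := by
  induction s with
  | nil => simp [pvAOuter, pvBChain]
  | cons c rest ih =>
    have hself : ¬ c > c := lt_irrefl c
    cases rest with
    | nil => simp [pvAOuter, pvAInner, pvBChain]
    | cons b t =>
      simp only [pvAOuter, pvAInner, if_neg hself, pvBChain] at *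
      by_cases hcb : c > b
      · simp [hcb, not_le.mpr hcb]
      · have hle : c ≤ b := not_lt.mp hcb
        simp only [if_neg hcb, hle]
        by_cases hin : pvAInner c t = true
        · have hbf : pvBChain (b :: t) = false := by
            obtain ⟨x, hx, hxc⟩ := pvAInner_eq_true.mp hin
            cases hbt : pvBChain (b :: t) with
            | false => rfl
            | true =>
              have := pvBChain_le hbt x hx
              exact absurd (lt_of_lt_of_le hxc hle) (not_lt.mpr this)
          simp [hin, hbf]
        · simp only [Bool.not_eq_true] at hin
          have ih' : (pvAInner b t || pvAOuter t) = !pvBChain (b :: t) := by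
            simpa [pvAOuter, pvAInner, lt_irrefl, Bool.if_true_left] using ih
          simpa [hin] using ih'

theorem possibleChanges_foldl (usernames : List String) (acc : List String) :
    usernames.foldl (fun res name =>
      res ++ [if pvAOuter name.toList then "YES" else "NO"]) acc
    = acc ++ usernames.map (fun name => if pvBChain name.toList then "NO" else "YES") := by
  induction usernames generalizing acc with
  | nil => simp
  | cons n rest ih =>
    rw [List.foldl_cons, ih, pvAOuter_eq_not_bChain]
    cases h : pvBChain n.toList <;> simp [h]

-- ===== VERDICT (by name: the statement is the Claim_ definition above) =====
theorem possibleChanges_spec : Claim_equal_possibleChanges := by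
  intro usernames _
  show possibleChanges usernames = possibleChanges_alt usernames
  simpa [possibleChanges, possibleChanges_alt] using possibleChanges_foldl usernames []
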